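-- pv_equiv track=rewrite | github.com/snirmeir/broshim-mesnir | generator.py | int_to_gematria
-- ===== SOURCE A (Python) =====
-- def int_to_gematria(num):
--     if num <= 0: return ''
--     letters = {
--         400: 'ת', 300: 'ש', 200: 'ר', 100: 'ק',
--         90: 'צ', 80: 'פ', 70: 'ע', 60: 'ס', 50: 'נ', 40: 'מ', 30: 'ל', 20: 'כ', 10: 'י',
--         9: 'ט', 8: 'ח', 7: 'ז', 6: 'ו', 5: 'ה', 4: 'ד', 3: 'ג', 2: 'ב', 1: 'א'
--     }
--     result = ''
--     while num > 0:
--         if num == 15: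
--             result += 'טו'; num -= 15
--         elif num == 16:
--             result += 'טז'; num -= 16
--         else:
--             for val, char in letters.items():
--                 if num >= val:
--                     result += char
--                     num -= val
--                     break
--     return result
-- ===== SOURCE B (Python) =====
-- HUNDRED = {0: '', 1: 'ק', 2: 'ר', 3: 'ש'}
-- TEN = {0: '', 1: 'י', 2: 'כ', 3: 'ל', 4: 'מ', 5: 'נ', 6: 'ס', 7: 'ע', 8: 'פ', 9: 'צ'}
-- UNIT = {0: '', 1: 'א', 2: 'ב', 3: 'ג', 4: 'ד', 5: 'ה', 6: 'ו', 7: 'ז', 8: 'ח', 9: 'ט'}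
--
-- def int_to_gematria(num):
--     if num <= 0:
--         return ''
--     h, r = divmod(num, 100)
--     hundreds = 'ת' * (h // 4) + HUNDRED[h % 4]
--     if r == 15:
--         rest = 'טו'
--     elif r == 16:
--         rest = 'טז'
--     else:
--         rest = TEN[r // 10] + UNIT[r % 10]
--     return hundreds + rest
-- ===== Notes on version B (the rewrite author's own statement) =====
-- stated objective: alternative
-- what changed: Replaced the greedy repeated-subtraction loop over the letter-value table by a closed arithmetic decomposition: divmod by a hundred splits the number into a taw run plus one hundreds letter and a remainder resolved by direct digit-table lookups (with the tet-vav/tet-zayin special case applied to the remainder).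
import Mathlib
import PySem

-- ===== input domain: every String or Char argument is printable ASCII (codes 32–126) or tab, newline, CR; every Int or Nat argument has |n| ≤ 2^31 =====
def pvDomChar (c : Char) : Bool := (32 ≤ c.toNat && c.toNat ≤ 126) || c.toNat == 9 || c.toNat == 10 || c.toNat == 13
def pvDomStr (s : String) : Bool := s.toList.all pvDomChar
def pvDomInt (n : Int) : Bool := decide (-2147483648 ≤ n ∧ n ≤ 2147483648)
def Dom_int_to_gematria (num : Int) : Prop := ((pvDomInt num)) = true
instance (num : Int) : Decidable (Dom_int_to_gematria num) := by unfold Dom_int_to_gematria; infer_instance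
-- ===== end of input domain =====

-- B replaces A's greedy repeated-subtraction loop by a direct divmod decomposition into a taw run plus digit-table lookups (alternative algorithm; return values proved equal for every Int).
-- Strings are handled as List Char internally (PySem convention) and wrapped with String.ofList at the boundary.

-- ===== PORT A =====
-- the dict `letters` in iteration (insertion) order
def lettersA : List (Int × List Char) :=
  [(400, ['ת']), (300, ['ש']), (200, ['ר']), (100, ['ק']),
   (90, ['צ']), (80, ['פ']), (70, ['ע']), (60, ['ס']), (50, ['נ']), (40, ['מ']), (30, ['ל']), (20, ['כ']), (10, ['י']),
   (9, ['ט']), (8, ['ח']), (7, ['ז']), (6, ['ו']), (5, ['ה']), (4, ['ד']), (3, ['ג']), (2, ['ב']), (1, ['א'])]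

-- the inner `for val, char in letters.items(): if num >= val: … break`
def findLetterA (l : List (Int × List Char)) (num : Int) : Option (Int × List Char) :=
  match l with
  | [] => none
  | (v, c) :: rest => if num ≥ v then some (v, c) else findLetterA rest num

-- the `while num > 0` loop, accumulator `result`; fuel is a pure totality guard:
-- every iteration subtracts at least 1, so fuel = num.toNat (supplied below) never runs out
def gematriaGoA : Nat → Int → List Char → List Char
  | 0, _, result => result
  | fuel + 1, num, result =>
    if num > 0 then
      if num = 15 then gematriaGoA fuel (num - 15) (result ++ ['ט', 'ו'])
      else if num = 16 then gematriaGoA fuel (num - 16) (result ++ ['ט', 'ז'])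
      else
        match findLetterA lettersA num with
        | some (v, c) => gematriaGoA fuel (num - v) (result ++ c)
        | none => result   -- unreachable for num > 0 (value 1 always matches)
    else result

def int_to_gematria (num : Int) : String :=
  if num ≤ 0 then "" else String.ofList (gematriaGoA num.toNat num [])

-- ===== PORT B =====
-- dict lookups {0:'',1:'ק',2:'ר',3:'ש'}[·] etc.; the argument is always a mod in 0..3 / 0..9, so the
-- default branch is unreachable and the match is exact.
def hundredLetterB : Int → List Char
  | 1 => ['ק'] | 2 => ['ר'] | 3 => ['ש'] | _ => []

def tenLetterB : Int → List Char
  | 1 => ['י'] | 2 => ['כ'] | 3 => ['ל'] | 4 => ['מ'] | 5 => ['נ']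
  | 6 => ['ס'] | 7 => ['ע'] | 8 => ['פ'] | 9 => ['צ'] | _ => []

def unitLetterB : Int → List Char
  | 1 => ['א'] | 2 => ['ב'] | 3 => ['ג'] | 4 => ['ד'] | 5 => ['ה']
  | 6 => ['ו'] | 7 => ['ז'] | 8 => ['ח'] | 9 => ['ט'] | _ => []

-- h, r = divmod(num, 100); 'ת'*(h//4) + HUNDRED[h%4] + (15/16 special case on r, else TEN[r//10]+UNIT[r%10])
def altListB (num : Int) : List Char :=
  let h := PySem.Int.floordiv num 100
  let r := PySem.Int.mod num 100
  let hundreds := List.replicate (PySem.Int.floordiv h 4).toNat 'ת' ++ hundredLetterB (PySem.Int.mod h 4)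
  let rest :=
    if r = 15 then ['ט', 'ו']
    else if r = 16 then ['ט', 'ז']
    else tenLetterB (PySem.Int.floordiv r 10) ++ unitLetterB (PySem.Int.mod r 10)
  hundreds ++ rest

def int_to_gematria_alt (num : Int) : String :=
  if num ≤ 0 then "" else String.ofList (altListB num)

-- ===== PRECONDITION & SPEC =====
def Spec_int_to_gematria (num : Int) (out : String) : Prop := out = int_to_gematria_alt num
instance (num : Int) (out : String) : Decidable (Spec_int_to_gematria num out) := by unfold Spec_int_to_gematria; infer_instance

-- ===== CLAIM (what is proved, stated in full; the proofs are below) =====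
def Claim_equal_int_to_gematria : Prop := ∀ (num : Int), Dom_int_to_gematria num → Spec_int_to_gematria num (int_to_gematria num)

-- ===== LEMMAS AND PROOFS =====

theorem findLetterA_sound : ∀ (l : List (Int × List Char)) (n v : Int) (c : List Char),
    findLetterA l n = some (v, c) → v ≤ n ∧ (v, c) ∈ l := by
  intro l
  induction l with
  | nil => intro n v c h; simp [findLetterA] at h
  | cons p rest ih =>
    obtain ⟨pv, pc⟩ := p
    intro n v c h
    rw [findLetterA] at h
    split_ifs at h with hc
    · obtain ⟨h1, h2⟩ := Option.some.injEq _ _ ▸ h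
      cases h
      exact ⟨by omega, List.mem_cons_self⟩
    · have := ih n v c h
      exact ⟨this.1, List.mem_cons_of_mem _ this.2⟩

theorem lettersA_pos : ∀ p ∈ lettersA, (1 : Int) ≤ p.1 := by decide

theorem findLetterA_lettersA_bound (n v : Int) (c : List Char)
    (h : findLetterA lettersA n = some (v, c)) : 1 ≤ v ∧ v ≤ n := by
  have hs := findLetterA_sound lettersA n v c h
  exact ⟨lettersA_pos _ hs.2, hs.1⟩

-- fuel irrelevance: any fuel ≥ num.toNat gives the same result
theorem goA_fuel_irrel : ∀ (f : Nat), ∀ (num : Int) (f' : Nat) (res : List Char),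
    num.toNat ≤ f → num.toNat ≤ f' → gematriaGoA f num res = gematriaGoA f' num res := by
  intro f
  induction f using Nat.strong_induction_on with
  | _ f ih =>
    intro num f' res hf hf'
    by_cases hpos : num > 0
    · have h1 : 1 ≤ num.toNat := by omega
      obtain ⟨g, rfl⟩ : ∃ g, f = g + 1 := ⟨f - 1, by omega⟩
      obtain ⟨g', rfl⟩ : ∃ g', f' = g' + 1 := ⟨f' - 1, by omega⟩
      rw [gematriaGoA, gematriaGoA]
      simp only [hpos, if_true]
      by_cases h15 : num = 15
      · simp only [h15, if_true]
        exact ih g (by omega) _ g' _ (by omega) (by omega)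
      · by_cases h16 : num = 16
        · simp only [h16, if_true]
          exact ih g (by omega) _ g' _ (by omega) (by omega)
        · simp only [h15, h16, if_false]
          cases hfind : findLetterA lettersA num with
          | none => rfl
          | some p =>
            obtain ⟨v, c⟩ := p
            have hb := findLetterA_lettersA_bound num v c hfind
            exact ih g (by omega) _ g' _ (by omega) (by omega)
    · cases f' <;> cases g : f <;> rw [gematriaGoA] <;> try rw [gematriaGoA]
      all_goals simp [hpos]

-- accumulator lemma
theorem goA_acc : ∀ (f : Nat), ∀ (num : Int) (res : List Char),
    num.toNat ≤ f → gematriaGoA f num res = res ++ gematriaGoA f num [] := by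
  intro f
  induction f using Nat.strong_induction_on with
  | _ f ih =>
    intro num res hf
    by_cases hpos : num > 0
    · obtain ⟨g, rfl⟩ : ∃ g, f = g + 1 := ⟨f - 1, by omega⟩
      rw [gematriaGoA]
      conv_rhs => rw [gematriaGoA]
      simp only [hpos, if_true]
      by_cases h15 : num = 15
      · simp only [if_pos h15]
        rw [ih g (by omega) (num - 15) (res ++ ['ט','ו']) (by omega),
            ih g (by omega) (num - 15) ([] ++ ['ט','ו']) (by omega)]
        simp
      · by_cases h16 : num = 16
        · simp only [if_neg h15, if_pos h16]
          rw [ih g (by omega) (num - 16) (res ++ ['ט','ז']) (by omega),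
              ih g (by omega) (num - 16) ([] ++ ['ט','ז']) (by omega)]
          simp
        · simp only [if_neg h15, if_neg h16]
          cases hfind : findLetterA lettersA num with
          | none => simp
          | some p =>
            obtain ⟨v, c⟩ := p
            have hb := findLetterA_lettersA_bound num v c hfind
            dsimp only
            rw [ih g (by omega) (num - v) (res ++ c) (by omega),
                ih g (by omega) (num - v) ([] ++ c) (by omega)]
            simp
    · cases g : f <;> simp [gematriaGoA, hpos]

-- A peels one taw for num ≥ 400
theorem A_step (num : Int) (h : 400 ≤ num) :
    gematriaGoA num.toNat num [] = 'ת' :: gematriaGoA (num - 400).toNat (num - 400) [] := by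
  obtain ⟨g, hg⟩ : ∃ g, num.toNat = g + 1 := ⟨num.toNat - 1, by omega⟩
  rw [hg, gematriaGoA]
  have hpos : num > 0 := by omega
  have h15 : ¬ num = 15 := by omega
  have h16 : ¬ num = 16 := by omega
  have hfind : findLetterA lettersA num = some (400, ['ת']) := by
    rw [lettersA, findLetterA]
    simp [h]
  simp only [hpos, if_true, h15, h16, if_false, hfind]
  simp only [List.nil_append]
  rw [goA_acc g (num - 400) ['ת'] (by omega),
      goA_fuel_irrel g (num - 400) (num - 400).toNat [] (by omega) (by omega)]
  simp

-- B peels one taw when 400 is added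
theorem B_step (m : Int) (hm : 0 ≤ m) : altListB (m + 400) = 'ת' :: altListB m := by
  have fd100 : ∀ a : Int, PySem.Int.floordiv a 100 = a / 100 :=
    fun a => PySem.Int.floordiv_eq_ediv_of_pos (by norm_num)
  have md100 : ∀ a : Int, PySem.Int.mod a 100 = a % 100 :=
    fun a => PySem.Int.mod_eq_emod_of_pos (by norm_num)
  have fd4 : ∀ a : Int, PySem.Int.floordiv a 4 = a / 4 :=
    fun a => PySem.Int.floordiv_eq_ediv_of_pos (by norm_num)
  have md4 : ∀ a : Int, PySem.Int.mod a 4 = a % 4 :=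
    fun a => PySem.Int.mod_eq_emod_of_pos (by norm_num)
  rw [altListB, altListB]
  simp only [fd100, md100, fd4, md4]
  have e100 : (m + 400) / 100 = m / 100 + 4 := by omega
  have em100 : (m + 400) % 100 = m % 100 := by omega
  have e4 : (m / 100 + 4) / 4 = m / 100 / 4 + 1 := by omega
  have em4 : (m / 100 + 4) % 4 = m / 100 % 4 := by omega
  have hrep : ((m / 100 + 4) / 4).toNat = (m / 100 / 4).toNat + 1 := by
    rw [e4]; omega
  simp only [e100, em100, em4, hrep, List.replicate_succ]
  simp

-- base range, by computation (the loop runs at most a handful of steps here)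
set_option maxRecDepth 100000 in
theorem base_eq : ∀ n : Nat, n < 400 → gematriaGoA n (n : Int) [] = altListB (n : Int) := by
  decide

theorem main_eq : ∀ n : Nat, gematriaGoA n (n : Int) [] = altListB (n : Int) := by
  intro n
  induction n using Nat.strong_induction_on with
  | _ n ih =>
    by_cases hsm : n < 400
    · exact base_eq n hsm
    · have hA0 : ((n : Int)).toNat = n := by omega
      have hcast : ((n : Int) - 400) = ((n - 400 : Nat) : Int) := by omega
      have hA : gematriaGoA n (n : Int) [] = 'ת' :: gematriaGoA (n - 400) ((n - 400 : Nat) : Int) [] := by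
        have := A_step (n : Int) (by omega)
        rw [hA0] at this
        rw [this, hcast]
        simp only [Int.toNat_natCast]
      have hB : altListB (n : Int) = 'ת' :: altListB ((n - 400 : Nat) : Int) := by
        have := B_step ((n - 400 : Nat) : Int) (by omega)
        rw [show ((n - 400 : Nat) : Int) + 400 = (n : Int) by omega] at this
        exact this
      rw [hA, hB, ih (n - 400) (by omega)]

-- ===== VERDICT (by name: the statement is the Claim_ definition above) =====
theorem int_to_gematria_spec : Claim_equal_int_to_gematria := by
  intro num _
  unfold Spec_int_to_gematria
  rw [int_to_gematria, int_to_gematria_alt]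
  by_cases h : num ≤ 0
  · simp [h]
  · simp only [h, if_false]
    have hcast : num = ((num.toNat : Nat) : Int) := by omega
    rw [hcast]
    simp only [Int.toNat_natCast]
    rw [main_eq num.toNat]
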